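-- pv_equiv track=rewrite | github.com/PhilipGazagnes/livenotes-video-generator | state.py | _find_beat_state
-- ===== SOURCE A (Python) =====
-- def _find_beat_state(t, block_id, beat_events):
--     """Last beat event for block_id at or before t."""
--     state = {'chord_group_idx': 0, 'repeat_idx': 0, 'measure_idx': 0, 'beat_idx': 0}
--     for ev in beat_events:
--         if ev['t'] > t:
--             break
--         if ev['block_id'] == block_id:
--             state = {k: ev[k] for k in ('chord_group_idx', 'repeat_idx', 'measure_idx', 'beat_idx')}
--     return state
-- ===== SOURCE B (Python) =====
-- def _find_beat_state(t, block_id, beat_events):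
--     """Last beat event for block_id at or before t."""
--     # length of the eligible prefix (events strictly before the first ev with ev['t'] > t)
--     n = 0
--     for ev in beat_events:
--         if ev['t'] > t:
--             break
--         n += 1
--     # scan the eligible prefix backwards; first match wins
--     for ev in reversed(beat_events[:n]):
--         if ev['block_id'] == block_id:
--             return {'chord_group_idx': ev['chord_group_idx'],
--                     'repeat_idx': ev['repeat_idx'],
--                     'measure_idx': ev['measure_idx'],
--                     'beat_idx': ev['beat_idx']}
--     return {'chord_group_idx': 0, 'repeat_idx': 0, 'measure_idx': 0, 'beat_idx': 0}
-- ===== Notes on version B (the rewrite author's own statement) =====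
-- stated objective: alternative
-- what changed: Replaces A's forward last-match state-tracking (which rebuilds the state dict at every matching event) with a prefix-length scan followed by a reverse early-return search over the eligible prefix, building the result dict once.
import Mathlib
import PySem

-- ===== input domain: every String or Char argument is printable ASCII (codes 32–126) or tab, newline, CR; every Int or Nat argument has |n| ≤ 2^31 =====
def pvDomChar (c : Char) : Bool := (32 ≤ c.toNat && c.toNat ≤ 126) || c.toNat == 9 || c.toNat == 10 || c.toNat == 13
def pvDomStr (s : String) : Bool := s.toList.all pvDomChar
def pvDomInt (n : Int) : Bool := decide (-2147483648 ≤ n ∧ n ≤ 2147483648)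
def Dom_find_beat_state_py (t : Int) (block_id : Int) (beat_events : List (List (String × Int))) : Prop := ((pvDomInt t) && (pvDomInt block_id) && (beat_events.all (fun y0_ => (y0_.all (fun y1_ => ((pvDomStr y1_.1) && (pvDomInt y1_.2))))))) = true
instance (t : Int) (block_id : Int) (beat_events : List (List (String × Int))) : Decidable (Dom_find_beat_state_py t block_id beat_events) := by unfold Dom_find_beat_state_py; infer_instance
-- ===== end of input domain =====

-- B replaces A's forward last-match state tracking by a prefix-length scan plus a reverse
-- early-return search over the eligible prefix (objective: alternative decomposition).

-- ===== PORT A =====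
-- ev[k] on a dict (assoc list, first match); inside Pre_ the key is present, so getD 0 is exact
def pvEvGet (ev : List (String × Int)) (k : String) : Int := (ev.lookup k).getD 0

-- {k: ev[k] for k in ('chord_group_idx', 'repeat_idx', 'measure_idx', 'beat_idx')}
def pvStateA (ev : List (String × Int)) : List (String × Int) :=
  ["chord_group_idx", "repeat_idx", "measure_idx", "beat_idx"].map (fun k => (k, pvEvGet ev k))

-- the for-loop of A: break on ev['t'] > t, else update state on a block_id match
def pvLoopA (t : Int) (block_id : Int) :
    List (List (String × Int)) → List (String × Int) → List (String × Int)
  | [], state => state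
  | ev :: rest, state =>
    if pvEvGet ev "t" > t then state
    else pvLoopA t block_id rest
      (if pvEvGet ev "block_id" == block_id then pvStateA ev else state)

def find_beat_state_py (t : Int) (block_id : Int)
    (beat_events : List (List (String × Int))) : List (String × Int) :=
  pvLoopA t block_id beat_events
    [("chord_group_idx", 0), ("repeat_idx", 0), ("measure_idx", 0), ("beat_idx", 0)]

-- ===== PORT B =====
-- first loop of B: number n of events before the break point
def pvPrefixLenB (t : Int) : List (List (String × Int)) → Nat
  | [] => 0
  | ev :: rest => if pvEvGet ev "t" > t then 0 else pvPrefixLenB t rest + 1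

-- the dict literal B builds for a matching event
def pvStateB (ev : List (String × Int)) : List (String × Int) :=
  [("chord_group_idx", pvEvGet ev "chord_group_idx"),
   ("repeat_idx", pvEvGet ev "repeat_idx"),
   ("measure_idx", pvEvGet ev "measure_idx"),
   ("beat_idx", pvEvGet ev "beat_idx")]

-- second loop of B: first block_id match of the reversed prefix, else the default state
def pvScanRevB (block_id : Int) : List (List (String × Int)) → List (String × Int)
  | [] => [("chord_group_idx", 0), ("repeat_idx", 0), ("measure_idx", 0), ("beat_idx", 0)]
  | ev :: rest => if pvEvGet ev "block_id" == block_id then pvStateB ev else pvScanRevB block_id rest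

def find_beat_state_py_alt (t : Int) (block_id : Int)
    (beat_events : List (List (String × Int))) : List (String × Int) :=
  -- beat_events[:n] with n = prefix length (0 ≤ n ≤ len): exactly List.take
  pvScanRevB block_id ((beat_events.take (pvPrefixLenB t beat_events)).reverse)

-- ===== PRECONDITION & SPEC =====
-- the events A actually scans fully: the longest prefix whose events have key 't' with value ≤ t
def pvScanned (t : Int) (beat_events : List (List (String × Int))) : List (List (String × Int)) :=
  beat_events.takeWhile (fun ev => decide ((ev.lookup "t").getD (t + 1) ≤ t))

-- Pre_ = exactly the inputs on which Python A returns (KeyError otherwise): every scanned event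
-- has key 'block_id', every scanned event matching block_id has the four state keys, and the
-- break event (the one right after the scanned prefix), if any, has key 't'.
def Pre_find_beat_state_py (t : Int) (block_id : Int)
    (beat_events : List (List (String × Int))) : Prop :=
  (∀ ev ∈ pvScanned t beat_events,
      (ev.lookup "block_id").isSome = true ∧
      ((ev.lookup "block_id").getD 0 = block_id →
        (ev.lookup "chord_group_idx").isSome = true ∧
        (ev.lookup "repeat_idx").isSome = true ∧
        (ev.lookup "measure_idx").isSome = true ∧
        (ev.lookup "beat_idx").isSome = true)) ∧
  (∀ ev ∈ (beat_events.drop (pvScanned t beat_events).length).take 1,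
      (ev.lookup "t").isSome = true)

instance (t : Int) (block_id : Int) (beat_events : List (List (String × Int))) :
    Decidable (Pre_find_beat_state_py t block_id beat_events) := by
  unfold Pre_find_beat_state_py; infer_instance

def pvWitness_find_beat_state_py : Int × Int × (List (List (String × Int))) :=
  (3, 1, [[("t", 0), ("block_id", 1), ("chord_group_idx", 2), ("repeat_idx", 1),
           ("measure_idx", 4), ("beat_idx", 3)],
          [("t", 9), ("block_id", 1)]])

def Spec_find_beat_state_py (t : Int) (block_id : Int) (beat_events : List (List (String × Int))) (out : List (String × Int)) : Prop := out = find_beat_state_py_alt t block_id beat_events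
instance (t : Int) (block_id : Int) (beat_events : List (List (String × Int))) (out : List (String × Int)) : Decidable (Spec_find_beat_state_py t block_id beat_events out) := by unfold Spec_find_beat_state_py; infer_instance

-- ===== CLAIM (what is proved, stated in full; the proofs are below) =====
def Claim_equal_find_beat_state_py : Prop := ∀ (t : Int) (block_id : Int) (beat_events : List (List (String × Int))), Dom_find_beat_state_py t block_id beat_events → Pre_find_beat_state_py t block_id beat_events → Spec_find_beat_state_py t block_id beat_events (find_beat_state_py t block_id beat_events)

-- ===== LEMMAS AND PROOFS =====

-- pvScanRevB with an arbitrary fallback instead of the default state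
def pvScanGen (block_id : Int) :
    List (List (String × Int)) → List (String × Int) → List (String × Int)
  | [], s => s
  | ev :: rest, s =>
    if pvEvGet ev "block_id" == block_id then pvStateB ev else pvScanGen block_id rest s

theorem pvScanRevB_eq_gen (block_id : Int) (l : List (List (String × Int))) :
    pvScanRevB block_id l =
      pvScanGen block_id l
        [("chord_group_idx", 0), ("repeat_idx", 0), ("measure_idx", 0), ("beat_idx", 0)] := by
  induction l with
  | nil => rfl
  | cons ev rest ih =>
    simp only [pvScanRevB, pvScanGen]
    split <;> simp [ih]

theorem pvScanGen_append_singleton (block_id : Int) (l : List (List (String × Int)))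
    (ev : List (String × Int)) (s : List (String × Int)) :
    pvScanGen block_id (l ++ [ev]) s =
      pvScanGen block_id l (if pvEvGet ev "block_id" == block_id then pvStateB ev else s) := by
  induction l with
  | nil => rfl
  | cons x rest ih =>
    simp only [List.cons_append, pvScanGen]
    split <;> simp [ih]

theorem pvStateA_eq_pvStateB (ev : List (String × Int)) : pvStateA ev = pvStateB ev := rfl

theorem pvLoopA_eq_scan (t block_id : Int) (evs : List (List (String × Int)))
    (s : List (String × Int)) :
    pvLoopA t block_id evs s =
      pvScanGen block_id ((evs.take (pvPrefixLenB t evs)).reverse) s := by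
  induction evs generalizing s with
  | nil => rfl
  | cons ev rest ih =>
    simp only [pvLoopA, pvPrefixLenB]
    by_cases h : pvEvGet ev "t" > t
    · simp [h, pvScanGen]
    · simp only [h, ite_false]
      rw [ih]
      simp [List.take_succ_cons, List.reverse_cons, pvScanGen_append_singleton,
        pvStateA_eq_pvStateB]

-- ===== VERDICT (by name: the statement is the Claim_ definition above) =====
theorem find_beat_state_py_spec : Claim_equal_find_beat_state_py := by
  intro t block_id beat_events _ _
  unfold Spec_find_beat_state_py find_beat_state_py find_beat_state_py_alt
  rw [pvLoopA_eq_scan, pvScanRevB_eq_gen]
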